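-- pv_equiv track=rewrite | github.com/TheGamingEngineer/UC_san_Diego_bioinf_courses | bioinformatics_II_codes.py | NGA50
-- ===== SOURCE A (Python) =====
-- def NGA50(genome,contig):
--     contig_break_ups=[]
--     new_contig=""
--     for i in range(len(contig)):
--         new_contig+=contig[i]
--         if new_contig not in genome:
--             contig_break_ups.append(new_contig[0:-1])
--             new_contig=contig[i]
--         elif i==len(contig)-1:
--             contig_break_ups.append(new_contig)
--     return contig_break_ups
-- ===== SOURCE B (Python) =====
-- def _next_break(genome, contig, s, lo):
--     # smallest i in [lo, n] such that i == n or contig[s:i+1] is not in genome,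
--     # found by galloping with a doubling step and then binary searching: the
--     # predicate is monotone in i (any extension of a string absent from the
--     # genome is absent), so after the gallop the answer lies in [lo, hi].
--     n = len(contig)
--     q, step = lo, 1
--     while q < n and contig[s:q + 1] in genome:
--         lo = q + 1
--         q += step
--         step *= 2
--     hi = min(q, n)
--     while lo < hi:
--         mid = (lo + hi) // 2
--         if contig[s:mid + 1] in genome:
--             lo = mid + 1
--         else:
--             hi = mid
--     return lo
--
-- def NGA50(genome, contig):
--     pieces = []
--     n = len(contig)
--     s = 0   # start of the piece currently being scanned
--     i = 0   # next position the scan would test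
--     while i < n:
--         i = _next_break(genome, contig, s, i)
--         if i == n:                    # every remaining test passes
--             pieces.append(contig[s:])
--             return pieces
--         pieces.append(contig[s:i])    # the piece ends where the test first fails
--         s = i
--         i += 1
--     return pieces
-- ===== Notes on version B (the rewrite author's own statement) =====
-- stated objective: alternative
-- what changed: Instead of regrowing the current piece one character at a time with a substring test after every position, B keeps a scan pointer and jumps straight to the position of the next failing test (or the end): it gallops with a doubling step and then binary-searches over the monotone predicate 'contig[s:i+1] occurs in genome', slicing each piece out in one step.
import Mathlib
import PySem

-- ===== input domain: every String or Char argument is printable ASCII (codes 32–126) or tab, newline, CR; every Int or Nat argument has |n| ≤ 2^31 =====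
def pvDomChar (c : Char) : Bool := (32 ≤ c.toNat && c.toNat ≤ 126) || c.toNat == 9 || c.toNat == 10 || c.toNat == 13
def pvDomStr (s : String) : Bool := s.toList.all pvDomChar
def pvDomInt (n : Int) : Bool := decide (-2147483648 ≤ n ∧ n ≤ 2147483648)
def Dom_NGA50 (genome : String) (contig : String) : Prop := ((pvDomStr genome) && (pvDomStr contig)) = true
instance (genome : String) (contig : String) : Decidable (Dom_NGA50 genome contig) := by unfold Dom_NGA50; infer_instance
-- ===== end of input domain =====

-- B replaces A's grow-by-one-character scan (one substring test per contig position) by a scan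
-- pointer that binary-searches for the position of the next failing test; same return value.
-- (loops are ported as structural recursion on a fuel argument that only makes them total)

-- ===== PORT A =====
-- the for-loop of A; state = (acc, new_contig, i); fuel ≥ number of remaining iterations
def pvLoopA (g cs : List Char) : Nat → List (List Char) → List Char → Nat → List (List Char)
  | 0, acc, _, _ => acc
  | fuel + 1, acc, nc, i =>
    if h : i < cs.length then
      let nc' := nc ++ [cs[i]]
      if PySem.Chars.isIn nc' g = false then
        pvLoopA g cs fuel (acc ++ [PySem.List.slice nc' none (some (-1))]) [cs[i]] (i + 1)
      else if i = cs.length - 1 then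
        pvLoopA g cs fuel (acc ++ [nc']) nc' (i + 1)
      else
        pvLoopA g cs fuel acc nc' (i + 1)
    else acc

def NGA50 (genome : String) (contig : String) : List String :=
  (pvLoopA genome.toList contig.toList contig.toList.length [] [] 0).map String.ofList

-- ===== PORT B =====
-- Source B's _next_break, first loop: gallop with a doubling step while tests pass; state = (lo, q, step)
def pvGallop (g cs : List Char) (s : Nat) : Nat → Nat → Nat → Nat → Nat × Nat
  | 0, lo, q, _ => (lo, q)
  | fuel + 1, lo, q, step =>
    if q < cs.length ∧ PySem.Chars.isIn (PySem.List.slice cs (some (s : Int)) (some ((q + 1 : Nat) : Int))) g = true then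
      pvGallop g cs s fuel (q + 1) (q + step) (step * 2)
    else (lo, q)

-- Source B's _next_break, second loop: binary search for the first failure inside the bracket
def pvBisect (g cs : List Char) (s : Nat) : Nat → Nat → Nat → Nat
  | 0, lo, _ => lo
  | fuel + 1, lo, hi =>
    if lo < hi then
      if PySem.Chars.isIn (PySem.List.slice cs (some (s : Int)) (some (((lo + hi) / 2 + 1 : Nat) : Int))) g then
        pvBisect g cs s fuel ((lo + hi) / 2 + 1) hi
      else
        pvBisect g cs s fuel lo ((lo + hi) / 2)
    else lo

-- Source B's _next_break: smallest i ≥ lo with i = n or contig[s:i+1] not in genome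
def pvNextBreak (g cs : List Char) (s lo : Nat) : Nat :=
  let pr := pvGallop g cs s (cs.length + 1) lo lo 1
  pvBisect g cs s cs.length pr.1 (min pr.2 cs.length)

-- Source B's while-loop: s = start of the current piece, i = next position the scan would test
def pvLoopB (g cs : List Char) : Nat → Nat → Nat → List (List Char) → List (List Char)
  | 0, _, _, acc => acc
  | fuel + 1, s, i, acc =>
    if i < cs.length then
      let i' := pvNextBreak g cs s i
      if i' = cs.length then
        acc ++ [PySem.List.slice cs (some (s : Int)) none]
      else
        pvLoopB g cs fuel i' (i' + 1) (acc ++ [PySem.List.slice cs (some (s : Int)) (some ((i' : Nat) : Int))])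
    else acc

def NGA50_alt (genome : String) (contig : String) : List String :=
  (pvLoopB genome.toList contig.toList contig.toList.length 0 0 []).map String.ofList

-- ===== PRECONDITION & SPEC =====
def Spec_NGA50 (genome : String) (contig : String) (out : List String) : Prop := out = NGA50_alt genome contig
instance (genome : String) (contig : String) (out : List String) : Decidable (Spec_NGA50 genome contig out) := by unfold Spec_NGA50; infer_instance

-- ===== CLAIM (what is proved, stated in full; the proofs are below) =====
def Claim_equal_NGA50 : Prop := ∀ (genome : String) (contig : String), Dom_NGA50 genome contig → Spec_NGA50 genome contig (NGA50 genome contig)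

-- ===== LEMMAS AND PROOFS =====

-- the piece contig[s:j] (as a list of chars)
def pvSeg (cs : List Char) (s j : Nat) : List Char := (cs.drop s).take (j - s)

-- "contig[s:j] occurs in genome"
def pvP (g cs : List Char) (s j : Nat) : Bool := PySem.Chars.isIn (pvSeg cs s j) g

lemma pvSeg_self (cs : List Char) (s : Nat) : pvSeg cs s s = [] := by
  simp [pvSeg]

lemma pvSeg_snoc (cs : List Char) (s i : Nat) (hsi : s ≤ i) (hi : i < cs.length) :
    pvSeg cs s i ++ [cs[i]] = pvSeg cs s (i + 1) := by
  unfold pvSeg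
  have h1 : i + 1 - s = (i - s) + 1 := by omega
  have h2 : i - s < (cs.drop s).length := by simp; omega
  rw [h1, List.take_add_one, List.getElem?_eq_getElem h2]
  have : (cs.drop s)[i - s] = cs[s + (i - s)] := List.getElem_drop ..
  simp [this, Nat.add_sub_cancel' hsi]

lemma pvSeg_dropLast (cs : List Char) (s i : Nat) (hsi : s ≤ i) (hi : i < cs.length) :
    (pvSeg cs s (i + 1)).dropLast = pvSeg cs s i := by
  rw [← pvSeg_snoc cs s i hsi hi, List.dropLast_concat]

lemma pvSeg_full (cs : List Char) (s : Nat) : pvSeg cs s cs.length = cs.drop s := by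
  unfold pvSeg
  exact List.take_of_length_le (by simp)

lemma pvSeg_eq_slice (cs : List Char) (s j : Nat) :
    PySem.List.slice cs (some (s : Int)) (some (j : Int)) = pvSeg cs s j := by
  rw [PySem.List.slice_natCast]; rfl

lemma pvP_mono (g cs : List Char) (s j j' : Nat) (hP : pvP g cs s j = true) (hle : j' ≤ j) :
    pvP g cs s j' = true := by
  unfold pvP at *
  rw [PySem.Chars.isIn_iff_infix] at *
  exact (List.IsPrefix.isInfix (List.take_prefix_take_left (by omega))).trans hP

-- exhausted index: A's loop returns its accumulator whatever the fuel
lemma pvLoopA_stop (g cs : List Char) (f : Nat) (acc : List (List Char)) (nc : List Char)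
    (i : Nat) (hi : ¬ i < cs.length) : pvLoopA g cs f acc nc i = acc := by
  cases f with
  | zero => rfl
  | succ f => rw [pvLoopA, dif_neg hi]

lemma pvLoopB_stop (g cs : List Char) (f s i : Nat) (acc : List (List Char))
    (hi : ¬ i < cs.length) : pvLoopB g cs f s i acc = acc := by
  cases f with
  | zero => rfl
  | succ f => rw [pvLoopB, if_neg hi]

-- gallop specification: from (lo, q=lo), pvGallop returns (lo', q') with every test in
-- [lo, lo') passing, and q' past the end or failing
lemma pvGallop_spec (g cs : List Char) (s : Nat) :
    ∀ (fuel lo q step : Nat), cs.length - q ≤ fuel → lo ≤ q → lo ≤ cs.length → 1 ≤ step →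
      lo ≤ (pvGallop g cs s fuel lo q step).1 ∧
        (pvGallop g cs s fuel lo q step).1 ≤ cs.length ∧
        (pvGallop g cs s fuel lo q step).1 ≤ (pvGallop g cs s fuel lo q step).2 ∧
        (∀ j, lo ≤ j → j < (pvGallop g cs s fuel lo q step).1 → pvP g cs s (j + 1) = true) ∧
        (cs.length ≤ (pvGallop g cs s fuel lo q step).2 ∨
          pvP g cs s ((pvGallop g cs s fuel lo q step).2 + 1) = false) := by
  intro fuel
  induction fuel with
  | zero =>
    intro lo q step hd hlq hln hs
    rw [pvGallop]
    exact ⟨le_refl _, hln, hlq, fun j h1 h2 => absurd h2 (by omega), Or.inl (by omega)⟩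
  | succ fuel ih =>
    intro lo q step hd hlq hln hs
    rw [pvGallop]
    by_cases hc : q < cs.length ∧
        PySem.Chars.isIn (PySem.List.slice cs (some (s : Int)) (some ((q + 1 : Nat) : Int))) g = true
    · rw [if_pos hc]
      have hPq : pvP g cs s (q + 1) = true := by
        rw [pvP, ← pvSeg_eq_slice]; exact hc.2
      obtain ⟨a1, a2, a3, a4, a5⟩ := ih (q + 1) (q + step) (step * 2)
        (by omega) (by omega) (by omega) (by omega)
      refine ⟨by omega, a2, a3, fun j h1 h2 => ?_, a5⟩
      by_cases hj : q + 1 ≤ j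
      · exact a4 j hj h2
      · exact pvP_mono g cs s (q + 1) (j + 1) hPq (by omega)
    · rw [if_neg hc]
      refine ⟨le_refl _, hln, hlq, fun j h1 h2 => absurd h2 (by omega), ?_⟩
      by_cases hq : q < cs.length
      · right
        rw [pvP, ← pvSeg_eq_slice]
        simpa [hq] using hc
      · exact Or.inl (by omega)

-- binary-search specification: pvBisect returns the first i in [lo, hi] with i = n or a failing
-- test, provided hi itself is such a position and the fuel covers the interval
lemma pvBisect_spec (g cs : List Char) (s : Nat) :
    ∀ (fuel lo hi : Nat), hi - lo ≤ fuel → lo ≤ hi → hi ≤ cs.length →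
      (hi = cs.length ∨ pvP g cs s (hi + 1) = false) →
      lo ≤ pvBisect g cs s fuel lo hi ∧ pvBisect g cs s fuel lo hi ≤ hi ∧
        (pvBisect g cs s fuel lo hi = cs.length ∨
          pvP g cs s (pvBisect g cs s fuel lo hi + 1) = false) ∧
        (∀ j, lo ≤ j → j < pvBisect g cs s fuel lo hi → pvP g cs s (j + 1) = true) := by
  intro fuel
  induction fuel with
  | zero =>
    intro lo hi hd hle hhn hF
    have h : lo = hi := by omega
    exact ⟨le_refl _, hle, by rw [pvBisect]; exact h ▸ hF,
      fun j h1 h2 => absurd h2 (by rw [pvBisect] at h2 ⊢; omega)⟩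
  | succ fuel ih =>
    intro lo hi hd hle hhn hF
    rw [pvBisect]
    by_cases hlh : lo < hi
    · rw [if_pos hlh]
      by_cases hin : PySem.Chars.isIn
          (PySem.List.slice cs (some (s : Int)) (some (((lo + hi) / 2 + 1 : Nat) : Int))) g = true
      · rw [if_pos hin]
        have hPmid : pvP g cs s ((lo + hi) / 2 + 1) = true := by
          rw [pvP, ← pvSeg_eq_slice]; exact hin
        obtain ⟨a1, a2, a3, a4⟩ := ih ((lo + hi) / 2 + 1) hi (by omega) (by omega) hhn hF
        refine ⟨by omega, a2, a3, fun j h1 h2 => ?_⟩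
        by_cases hjm : (lo + hi) / 2 + 1 ≤ j
        · exact a4 j hjm h2
        · exact pvP_mono g cs s ((lo + hi) / 2 + 1) (j + 1) hPmid (by omega)
      · rw [if_neg hin]
        rw [Bool.not_eq_true] at hin
        have hPmid : pvP g cs s ((lo + hi) / 2 + 1) = false := by
          rw [pvP, ← pvSeg_eq_slice]; exact hin
        obtain ⟨a1, a2, a3, a4⟩ := ih lo ((lo + hi) / 2) (by omega) (by omega) (by omega)
          (Or.inr hPmid)
        exact ⟨a1, by omega, a3, a4⟩
    · rw [if_neg hlh]
      have h : lo = hi := by omega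
      exact ⟨le_refl _, hle, h ▸ hF, fun j h1 h2 => absurd h2 (by omega)⟩

-- combined: pvNextBreak returns the first position at or after lo where the scan breaks (or n)
lemma pvNextBreak_spec (g cs : List Char) (s lo : Nat) (hlo : lo ≤ cs.length) :
    lo ≤ pvNextBreak g cs s lo ∧ pvNextBreak g cs s lo ≤ cs.length ∧
      (pvNextBreak g cs s lo = cs.length ∨ pvP g cs s (pvNextBreak g cs s lo + 1) = false) ∧
      (∀ j, lo ≤ j → j < pvNextBreak g cs s lo → pvP g cs s (j + 1) = true) := by
  obtain ⟨g1, g2, g3, g4, g5⟩ := pvGallop_spec g cs s (cs.length + 1) lo lo 1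
    (by omega) (le_refl _) hlo (le_refl _)
  have hQ : min (pvGallop g cs s (cs.length + 1) lo lo 1).2 cs.length = cs.length ∨
      pvP g cs s (min (pvGallop g cs s (cs.length + 1) lo lo 1).2 cs.length + 1) = false := by
    rcases g5 with h | h
    · exact Or.inl (by omega)
    · by_cases hlt : (pvGallop g cs s (cs.length + 1) lo lo 1).2 < cs.length
      · right; rwa [Nat.min_eq_left (by omega)]
      · exact Or.inl (by omega)
  obtain ⟨b1, b2, b3, b4⟩ := pvBisect_spec g cs s cs.length
    (pvGallop g cs s (cs.length + 1) lo lo 1).1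
    (min (pvGallop g cs s (cs.length + 1) lo lo 1).2 cs.length)
    (by omega) (by omega) (by omega) hQ
  have hdef : pvNextBreak g cs s lo
      = pvBisect g cs s cs.length (pvGallop g cs s (cs.length + 1) lo lo 1).1
        (min (pvGallop g cs s (cs.length + 1) lo lo 1).2 cs.length) := rfl
  rw [hdef]
  refine ⟨by omega, by omega, b3, fun j h1 h2 => ?_⟩
  by_cases hj : (pvGallop g cs s (cs.length + 1) lo lo 1).1 ≤ j
  · exact b4 j hj h2
  · exact g4 j h1 (by omega)

-- a run of passing tests moves pvLoopA from index i to index i + d, consuming d fuel, no output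
lemma pvLoopA_pass (g cs : List Char) (s : Nat) :
    ∀ (d f i : Nat) (acc : List (List Char)), s ≤ i → i + d < cs.length →
      (∀ j, i < j → j ≤ i + d → pvP g cs s j = true) →
      pvLoopA g cs (d + f) acc (pvSeg cs s i) i = pvLoopA g cs f acc (pvSeg cs s (i + d)) (i + d) := by
  intro d
  induction d with
  | zero => intro f i acc _ _ _; simp
  | succ d ih =>
    intro f i acc hsi hlen hpass
    have hi : i < cs.length := by omega
    have hfe : d + 1 + f = (d + f) + 1 := by omega
    rw [hfe, pvLoopA, dif_pos hi]
    simp only []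
    rw [pvSeg_snoc cs s i hsi hi]
    have hP1 : pvP g cs s (i + 1) = true := hpass (i + 1) (by omega) (by omega)
    rw [pvP] at hP1
    rw [if_neg (by rw [hP1]; simp)]
    rw [if_neg (by omega : ¬ i = cs.length - 1)]
    have harg : i + (d + 1) = i + 1 + d := by omega
    rw [harg]
    exact ih f (i + 1) acc (by omega) (by omega) (fun j h1 h2 => hpass j (by omega) (by omega))

-- the main correspondence: from A's state (piece started at s, next index i), A's loop produces
-- exactly B's loop from scan state (s, i), for any sufficient fuels
lemma pvLoopA_eq_pvLoopB (g cs : List Char) :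
    ∀ (d s i : Nat) (acc : List (List Char)) (fA fB : Nat), cs.length - i ≤ d → s ≤ i →
      i ≤ cs.length → cs.length ≤ i + fA → cs.length ≤ i + fB →
      pvLoopA g cs fA acc (pvSeg cs s i) i = pvLoopB g cs fB s i acc := by
  intro d
  induction d using Nat.strong_induction_on with
  | _ d ih =>
    intro s i acc fA fB hd hsi hin hfA hfB
    by_cases hi : i < cs.length
    · obtain ⟨fB', rfl⟩ : ∃ k, fB = k + 1 := ⟨fB - 1, by omega⟩
      rw [pvLoopB, if_pos hi]
      simp only []
      obtain ⟨b1, b2, b3, b4⟩ := pvNextBreak_spec g cs s i (by omega)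
      set i' := pvNextBreak g cs s i with hi'def
      by_cases hdone : i' = cs.length
      · -- no test fails any more: A's loop runs to the end and emits the whole remaining suffix
        rw [if_pos hdone]
        obtain ⟨f', hf'⟩ : ∃ k, fA = (cs.length - 1 - i) + (k + 1) := ⟨fA - (cs.length - i), by omega⟩
        rw [hf']
        rw [pvLoopA_pass g cs s (cs.length - 1 - i) (f' + 1) i acc hsi (by omega)
          (fun j h1 h2 => by
            have := b4 (j - 1) (by omega) (by omega)
            rwa [Nat.sub_add_cancel (by omega)] at this)]
        have he : i + (cs.length - 1 - i) = cs.length - 1 := by omega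
        rw [he]
        have hlt : cs.length - 1 < cs.length := by omega
        rw [pvLoopA, dif_pos hlt]
        simp only []
        rw [pvSeg_snoc cs s (cs.length - 1) (by omega) hlt]
        have hn1 : cs.length - 1 + 1 = cs.length := by omega
        rw [hn1]
        have hT : pvP g cs s cs.length = true := by
          have := b4 (cs.length - 1) (by omega) (by omega)
          rwa [hn1] at this
        rw [pvP] at hT
        rw [if_neg (by rw [hT]; simp), if_pos (by trivial)]
        rw [pvLoopA_stop g cs f' _ _ _ (by omega)]
        rw [PySem.List.slice_from_natCast, pvSeg_full]
      · -- the scan breaks at i' < n: A passes up to i', fails there, emits contig[s:i']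
        rw [if_neg hdone]
        have hlt : i' < cs.length := by omega
        have hfail : pvP g cs s (i' + 1) = false := by
          rcases b3 with h | h
          · exact absurd h hdone
          · exact h
        obtain ⟨f', hf'⟩ : ∃ k, fA = (i' - i) + (k + 1) := ⟨fA - (i' - i) - 1, by omega⟩
        rw [hf']
        rw [pvLoopA_pass g cs s (i' - i) (f' + 1) i acc hsi (by omega)
          (fun j h1 h2 => by
            have := b4 (j - 1) (by omega) (by omega)
            rwa [Nat.sub_add_cancel (by omega)] at this)]
        have he : i + (i' - i) = i' := by omega
        rw [he]
        rw [pvLoopA, dif_pos hlt]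
        simp only []
        rw [pvSeg_snoc cs s i' (by omega) hlt]
        rw [pvP] at hfail
        rw [if_pos (by rw [hfail])]
        rw [PySem.List.slice_to_neg_one, pvSeg_dropLast cs s i' (by omega) hlt]
        have hnc : [cs[i']] = pvSeg cs i' (i' + 1) := by
          rw [← pvSeg_snoc cs i' i' (le_refl i') hlt, pvSeg_self]; simp
        rw [hnc, pvSeg_eq_slice]
        exact ih (cs.length - (i' + 1)) (by omega) i' (i' + 1)
          (acc ++ [pvSeg cs s i']) f' fB' (le_refl _) (by omega) (by omega) (by omega) (by omega)
    · rw [pvLoopB_stop g cs _ _ _ _ hi, pvLoopA_stop g cs _ _ _ _ hi]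

-- ===== VERDICT (by name: the statement is the Claim_ definition above) =====
theorem NGA50_spec : Claim_equal_NGA50 := by
  intro genome contig _
  unfold Spec_NGA50 NGA50 NGA50_alt
  have h := pvLoopA_eq_pvLoopB genome.toList contig.toList contig.toList.length 0 0 []
    contig.toList.length contig.toList.length (le_refl _) (le_refl _) (Nat.zero_le _)
    (by omega) (by omega)
  rw [pvSeg_self] at h
  rw [h]
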